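-- pv_equiv track=rewrite | github.com/vgkits/vanguard-firmware | modules/vgkits/console/examples/hangman.py | gallowsLines
-- ===== SOURCE A (Python) =====
-- def manLines(parts):
--     """
--     Yields from 0 to 4 lines of a 'hangman' stick man. ::
--            O
--           /|\
--            |
--           / \
--
--     :param parts: the number of body parts to show from 0 to 7
--     :return:
--     """
--     # head line
--     if parts < 1:
--         return      # don't draw anything
--     else:
--         yield " O"      # draw head
--     # torso line
--     if parts < 2 :
--         return              # finished
--     else:
--         if parts < 3:
--             yield "/"       # draw one arm
--         elif parts < 4:
--             yield "/ \\"    # draw two arms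
--         else:
--             yield "/|\\"    # draw two arms and torso
--     # hips line
--     if parts < 5:
--         return          # finished
--     else:
--         yield " |"      # draw hips
--     # legs line
--     if parts < 6:
--         return
--     else:
--         if parts < 7:
--             yield "/"       # one leg
--         else:
--             yield "/ \\"    # both legs
--
-- def gallowsLines(parts):
--     """Yields a gallows, with a 'hangman' stick man showing the specified number of body parts. ::
--
--         ________
--         |       |
--         |       |
--         |       O
--         |      /|\
--         |       |
--         |      / \
--         |
--         |
--         |------------
--
--     :param parts:
--     :return:
--     """
--     yield "_______"
--     padding = "|    "
--     yield padding + " |"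
--     remaining = 5
--     for line in manLines(parts): # DRAW MAN FOR THIS STAGE
--         yield padding + line
--         remaining = remaining - 1
--     for count in range(0, remaining): # FILL REMAINING SPACE
--         yield padding
--     yield "|-------"
-- ===== SOURCE B (Python) =====
-- # Lookup table of fully pre-rendered man areas: clamp parts to 0..7, select the
-- # complete 5-line block; no threshold logic at all.
-- _STAGES = [
--     ("|    ",      "|    ",       "|    ",  "|    ",     "|    "),
--     ("|     O",    "|    ",       "|    ",  "|    ",     "|    "),
--     ("|     O",    "|    /",      "|    ",  "|    ",     "|    "),
--     ("|     O",    "|    / \\",   "|    ",  "|    ",     "|    "),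
--     ("|     O",    "|    /|\\",   "|    ",  "|    ",     "|    "),
--     ("|     O",    "|    /|\\",   "|     |","|    ",     "|    "),
--     ("|     O",    "|    /|\\",   "|     |","|    /",    "|    "),
--     ("|     O",    "|    /|\\",   "|     |","|    / \\", "|    "),
-- ]
--
-- def gallowsLines(parts):
--     stage = 0 if parts < 0 else 7 if parts > 7 else parts
--     yield "_______"
--     yield "|     |"
--     yield from _STAGES[stage]
--     yield "|-------"
-- ===== Notes on version B (the rewrite author's own statement) =====
-- stated objective: simpler
-- what changed: Replaces the manLines generator's threshold cascade and the decrementing blank-line counter with a lookup table of fully pre-rendered man-area blocks indexed by the clamped part count.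
import Mathlib
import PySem

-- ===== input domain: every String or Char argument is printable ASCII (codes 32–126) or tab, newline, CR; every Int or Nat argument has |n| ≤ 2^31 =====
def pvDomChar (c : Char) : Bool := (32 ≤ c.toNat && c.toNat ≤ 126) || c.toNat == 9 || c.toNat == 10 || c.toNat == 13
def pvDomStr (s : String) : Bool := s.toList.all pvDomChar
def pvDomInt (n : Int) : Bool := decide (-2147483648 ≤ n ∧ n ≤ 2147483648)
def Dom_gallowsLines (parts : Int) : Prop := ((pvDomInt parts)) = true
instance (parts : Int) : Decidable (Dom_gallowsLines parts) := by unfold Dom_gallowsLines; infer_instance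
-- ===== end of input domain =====

-- B replaces the threshold cascade and blank-line counter with a lookup table of
-- fully pre-rendered man-area blocks indexed by the clamped part count (objective: simpler).

-- ===== PORT A =====
-- manLines: literal transliteration of A's generator (early returns become [])
def manLines (parts : Int) : List String :=
  if parts < 1 then [] else
  " O" ::
  (if parts < 2 then [] else
    (if parts < 3 then "/" else if parts < 4 then "/ \\" else "/|\\") ::
    (if parts < 5 then [] else
      " |" ::
      (if parts < 6 then [] else
        [if parts < 7 then "/" else "/ \\"])))

def gallowsLines (parts : Int) : List String :=
  let padding := "|    "
  let st : List String × Int :=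
    (manLines parts).foldl
      (fun (s : List String × Int) line => (s.1 ++ [padding ++ line], s.2 - 1))
      (["_______", padding ++ " |"], 5)
  let acc := (PySem.List.pyRange 0 st.2 1).foldl (fun a _ => a ++ [padding]) st.1
  acc ++ ["|-------"]

-- ===== PORT B =====
def gallowsStages : List (List String) :=
  [["|    ",   "|    ",     "|    ",   "|    ",     "|    "],
   ["|     O", "|    ",     "|    ",   "|    ",     "|    "],
   ["|     O", "|    /",    "|    ",   "|    ",     "|    "],
   ["|     O", "|    / \\", "|    ",   "|    ",     "|    "],
   ["|     O", "|    /|\\", "|    ",   "|    ",     "|    "],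
   ["|     O", "|    /|\\", "|     |", "|    ",     "|    "],
   ["|     O", "|    /|\\", "|     |", "|    /",    "|    "],
   ["|     O", "|    /|\\", "|     |", "|    / \\", "|    "]]

def gallowsLines_alt (parts : Int) : List String :=
  let stage : Int := if parts < 0 then 0 else if parts > 7 then 7 else parts
  -- _STAGES[stage]: stage is provably in 0..7, so plain list indexing is exact here
  "_______" :: "|     |" :: (gallowsStages.getD stage.toNat []) ++ ["|-------"]

-- ===== PRECONDITION & SPEC =====
def Spec_gallowsLines (parts : Int) (out : List String) : Prop := out = gallowsLines_alt parts
instance (parts : Int) (out : List String) : Decidable (Spec_gallowsLines parts out) := by unfold Spec_gallowsLines; infer_instance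

-- ===== CLAIM (what is proved, stated in full; the proofs are below) =====
def Claim_equal_gallowsLines : Prop := ∀ (parts : Int), Dom_gallowsLines parts → Spec_gallowsLines parts (gallowsLines parts)

-- ===== LEMMAS AND PROOFS =====

-- ===== VERDICT (by name: the statement is the Claim_ definition above) =====
theorem gallowsLines_spec : Claim_equal_gallowsLines := by
  intro parts _
  unfold Spec_gallowsLines gallowsLines gallowsLines_alt manLines gallowsStages
  by_cases h0 : parts < 0
  · simp [show parts < 1 by omega, h0]
  · by_cases h1 : parts < 1
    · have : parts = 0 := by omega
      subst this; decide
    · by_cases h2 : parts < 2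
      · have : parts = 1 := by omega
        subst this; decide
      · by_cases h3 : parts < 3
        · have : parts = 2 := by omega
          subst this; decide
        · by_cases h4 : parts < 4
          · have : parts = 3 := by omega
            subst this; decide
          · by_cases h5 : parts < 5
            · have : parts = 4 := by omega
              subst this; decide
            · by_cases h6 : parts < 6
              · have : parts = 5 := by omega
                subst this; decide
              · by_cases h7 : parts < 7
                · have : parts = 6 := by omega
                  subst this; decide
                · by_cases h8 : parts > 7
                  · simp [show ¬ parts < 1 by omega, show ¬ parts < 2 by omega,
                      show ¬ parts < 3 by omega, show ¬ parts < 4 by omega,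
                      show ¬ parts < 5 by omega, show ¬ parts < 6 by omega,
                      show ¬ parts < 7 by omega, h0, h8]
                  · have : parts = 7 := by omega
                    subst this; decide
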